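-- pv_equiv track=rewrite | github.com/mengkjin/learndl | QuantFrame/packages/common_tools/fml_interpreter.py | seperate_1_term_into_fml_terms
-- ===== SOURCE A (Python) =====
-- def seperate_1_term_into_fml_terms(src_: str):
--     src = src_.replace(' ', '').lower()
--     assert len(src) > 0
--     if '[' not in src:
--         rtn = [None, src]
--     else:
--         assert src[-1] == ']', src_
--         op_abbrev = ''
--         for s in src:
--             if s != '[' and s != ']':
--                 op_abbrev += s
--             else:
--                 break
--         assert src[len(op_abbrev)] == '['
--         assert len(src) > len(op_abbrev) + 1
--         input_expression = src[len(op_abbrev) + 1: -1]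
--         rtn = [op_abbrev, input_expression]
--     return rtn
-- ===== SOURCE B (Python) =====
-- def seperate_1_term_into_fml_terms(src_: str):
--     src = src_.replace(' ', '').lower()
--     assert len(src) > 0
--     if '[' not in src:
--         return [None, src]
--     assert src[-1] == ']', src_
--     op_abbrev, _, input_expression = src[:-1].partition('[')
--     return [op_abbrev, input_expression]
-- ===== Notes on version B (the rewrite author's own statement) =====
-- stated objective: idiomatic
-- what changed: B replaces A's manual character-accumulating for-loop plus index/slice arithmetic with a single str.partition('[') applied to src[:-1], so the operator prefix and the bracketed expression fall out of one library call.
import Mathlib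
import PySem

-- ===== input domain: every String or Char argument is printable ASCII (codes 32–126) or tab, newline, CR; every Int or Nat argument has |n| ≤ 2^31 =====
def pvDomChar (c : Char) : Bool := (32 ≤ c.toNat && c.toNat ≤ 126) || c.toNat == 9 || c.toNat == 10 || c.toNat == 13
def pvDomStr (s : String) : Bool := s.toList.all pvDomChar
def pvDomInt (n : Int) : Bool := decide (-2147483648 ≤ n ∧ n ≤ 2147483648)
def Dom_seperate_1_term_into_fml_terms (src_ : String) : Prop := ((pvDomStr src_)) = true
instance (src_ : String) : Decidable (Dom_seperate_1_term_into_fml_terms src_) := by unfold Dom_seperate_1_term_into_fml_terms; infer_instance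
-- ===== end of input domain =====

-- B replaces A's character-accumulating for-loop and index arithmetic with one partition of src[:-1] on '[' (same cost, more idiomatic).

-- ===== PORT A =====
-- the 'for s in src: … else break' loop building op_abbrev
def pvALoop (acc : List Char) : List Char → List Char
  | [] => acc
  | c :: rest => if c ≠ '[' ∧ c ≠ ']' then pvALoop (acc ++ [c]) rest else acc

def seperate_1_term_into_fml_terms (src_ : String) : List (Option String) :=
  let src := PySem.Chars.lower (PySem.Chars.replace src_.toList [' '] [])
  -- assert len(src) > 0  (raises outside Pre_)
  if PySem.Chars.isIn ['['] src = false then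
    [none, some (String.ofList src)]
  else
    -- assert src[-1] == ']', src_  (raises outside Pre_)
    let op_abbrev := pvALoop [] src
    -- assert src[len(op_abbrev)] == '['; assert len(src) > len(op_abbrev) + 1  (raise outside Pre_)
    let input_expression := PySem.List.slice src (some ((op_abbrev.length : Int) + 1)) (some (-1))
    [some (String.ofList op_abbrev), some (String.ofList input_expression)]

-- ===== PORT B =====
-- hand port of str.partition(sep) for a single-character sep (exact: the part before the
-- first occurrence of sep, sep itself, and the rest; (cs, [], []) when sep is absent)
def pvPartitionChar (cs : List Char) (sep : Char) : List Char × List Char × List Char :=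
  let pre := cs.takeWhile (fun c => c != sep)
  if pre.length = cs.length then (cs, [], [])
  else (pre, [sep], cs.drop (pre.length + 1))

def seperate_1_term_into_fml_terms_alt (src_ : String) : List (Option String) :=
  let src := PySem.Chars.lower (PySem.Chars.replace src_.toList [' '] [])
  -- assert len(src) > 0  (raises outside Pre_)
  if PySem.Chars.isIn ['['] src = false then
    [none, some (String.ofList src)]
  else
    -- assert src[-1] == ']', src_  (raises outside Pre_)
    let p := pvPartitionChar (PySem.List.slice src none (some (-1))) '['
    [some (String.ofList p.1), some (String.ofList p.2.2)]

-- ===== PRECONDITION & SPEC =====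
-- Pre_ excludes exactly the inputs on which A raises AssertionError: empty (after removing
-- spaces) input, a bracketed input not ending in ']', and one whose first bracket is ']'.
def Pre_seperate_1_term_into_fml_terms (src_ : String) : Prop :=
  let src := PySem.Chars.lower (PySem.Chars.replace src_.toList [' '] [])
  src ≠ [] ∧ (PySem.Chars.isIn ['['] src = true →
    src.getLast? = some ']' ∧ ']' ∉ src.takeWhile (fun c => c != '['))
instance (src_ : String) : Decidable (Pre_seperate_1_term_into_fml_terms src_) := by
  unfold Pre_seperate_1_term_into_fml_terms; infer_instance

def pvWitness_seperate_1_term_into_fml_terms : String := "ma[close, 5]"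

def Spec_seperate_1_term_into_fml_terms (src_ : String) (out : List (Option String)) : Prop := out = seperate_1_term_into_fml_terms_alt src_
instance (src_ : String) (out : List (Option String)) : Decidable (Spec_seperate_1_term_into_fml_terms src_ out) := by unfold Spec_seperate_1_term_into_fml_terms; infer_instance

-- ===== CLAIM (what is proved, stated in full; the proofs are below) =====
def Claim_equal_seperate_1_term_into_fml_terms : Prop := ∀ (src_ : String), Dom_seperate_1_term_into_fml_terms src_ → Pre_seperate_1_term_into_fml_terms src_ → Spec_seperate_1_term_into_fml_terms src_ (seperate_1_term_into_fml_terms src_)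

-- ===== LEMMAS AND PROOFS =====

theorem pvALoop_eq (pre t : List Char) (acc : List Char)
    (h : ∀ c ∈ pre, c ≠ '[' ∧ c ≠ ']') :
    pvALoop acc (pre ++ '[' :: t) = acc ++ pre := by
  induction pre generalizing acc with
  | nil => simp [pvALoop]
  | cons c cs ih =>
      have hc := h c (by simp)
      simp only [List.cons_append, pvALoop, if_pos hc]
      rw [ih _ (fun x hx => h x (by simp [hx]))]
      simp

theorem takeWhile_all_cons (p : Char → Bool) (pre : List Char) (x : Char) (t : List Char)
    (h : ∀ c ∈ pre, p c = true) (hx : p x = false) :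
    (pre ++ x :: t).takeWhile p = pre := by
  induction pre with
  | nil => simp [hx]
  | cons c cs ih =>
      have hc := h c (by simp)
      simp [hc, ih (fun d hd => h d (by simp [hd]))]

theorem seperate_1_term_into_fml_terms_spec : Claim_equal_seperate_1_term_into_fml_terms := by
  intro src_ _ hpre
  obtain ⟨hne, hbr⟩ := hpre
  unfold Spec_seperate_1_term_into_fml_terms
  unfold seperate_1_term_into_fml_terms seperate_1_term_into_fml_terms_alt
  set cs := PySem.Chars.lower (PySem.Chars.replace src_.toList [' '] []) with hcs
  by_cases h : PySem.Chars.isIn ['['] cs = false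
  · simp [h]
  · have h' : PySem.Chars.isIn ['['] cs = true := by
      cases hh : PySem.Chars.isIn ['['] cs <;> simp_all
    obtain ⟨hlast, hnb⟩ := hbr h'
    -- '[' ∈ cs
    have hmem : '[' ∈ cs := by
      have := (PySem.Chars.isIn_iff_infix ['['] cs).mp h'
      exact (List.singleton_sublist.mp this.sublist)
    -- cs = body ++ [']']
    have hbody : cs = cs.dropLast ++ [']'] := by
      have h1 := List.dropLast_append_getLast hne
      have h2 : cs.getLast hne = ']' := by
        have := List.getLast?_eq_some_getLast (l := cs) hne
        rw [this] at hlast; exact (Option.some.inj hlast)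
      rw [h2] at h1; exact h1.symm
    set body := cs.dropLast with hb
    have hmb : '[' ∈ body := by
      rcases (List.mem_append.mp (hbody ▸ hmem)) with h1 | h1
      · exact h1
      · simp at h1
    -- decompose body at the first '['
    set p : Char → Bool := fun c => c != '[' with hp
    have hdw : body.dropWhile p ≠ [] := by
      intro hcon
      have := (List.dropWhile_eq_nil_iff.mp hcon) '[' hmb
      simp [hp] at this
    set pre := body.takeWhile p with hpredef
    obtain ⟨hd, tl, hht⟩ := List.exists_cons_of_ne_nil hdw
    have hhd : hd = '[' := by
      have h0 := List.head_dropWhile_not p hdw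
      have h1 : (List.dropWhile p body).head hdw = hd := by simp [hht]
      rw [h1] at h0
      simpa [hp] using h0
    have hdecomp : body = pre ++ '[' :: tl := by
      have := List.takeWhile_append_dropWhile (p := p) (l := body)
      rw [hht, hhd] at this; exact this.symm
    set suf := tl with hsuf
    -- pre contains neither bracket
    have hpre1 : ∀ c ∈ pre, c ≠ '[' := by
      intro c hc
      have := List.mem_takeWhile_imp hc
      simpa [hp] using this
    have hcs2 : cs = pre ++ '[' :: (suf ++ [']']) := by
      rw [hbody, hdecomp]; simp
    have htw : cs.takeWhile p = pre := by
      rw [hcs2]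
      exact takeWhile_all_cons p pre '[' (suf ++ [']'])
        (fun c hc => by simpa [hp] using hpre1 c hc) (by simp [hp])
    have hpre2 : ∀ c ∈ pre, c ≠ ']' := by
      intro c hc hcon
      exact hnb (by rw [htw]; exact hcon ▸ hc)
    -- A side
    have hloop : pvALoop [] cs = pre := by
      rw [hcs2]
      have := pvALoop_eq pre (suf ++ [']']) []
        (fun c hc => ⟨hpre1 c hc, hpre2 c hc⟩)
      simpa using this
    have hslice : PySem.List.slice cs (some ((pre.length : Int) + 1)) (some (-1)) = suf := by
      have hlen : cs.length = pre.length + suf.length + 2 := by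
        rw [hcs2]; simp; omega
      have hcast : ((pre.length : Int) + 1) = ((pre.length + 1 : Nat) : Int) := by push_cast; ring
      simp only [PySem.List.slice, hcast, PySem.List.clampIdx]
      have h1 : ¬ ((pre.length + 1 : Nat) : Int) < 0 := by omega
      rw [if_neg h1]
      have h2 : (-1 : Int) < 0 := by norm_num
      rw [if_pos h2]
      have h3 : ¬ ((cs.length : Int) + (-1) < 0) := by omega
      rw [if_neg h3]
      have h4 : min ((((pre.length + 1 : Nat)) : Int).toNat) cs.length = pre.length + 1 := by
        simp [hlen]; omega
      have h5 : ((cs.length : Int) + (-1)).toNat = pre.length + suf.length + 1 := by omega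
      rw [h4, h5]
      have hdrop : cs.drop (pre.length + 1) = suf ++ [']'] := by
        rw [hcs2, List.drop_append]
        simp
      rw [hdrop]
      have : pre.length + suf.length + 1 - (pre.length + 1) = suf.length := by omega
      rw [this]
      simpa using List.take_left' (l₂ := [']']) rfl
    -- B side
    have hbslice : PySem.List.slice cs none (some (-1)) = body := PySem.List.slice_to_neg_one cs
    have hpart : pvPartitionChar body '[' = (pre, ['['], suf) := by
      unfold pvPartitionChar
      have htwb : body.takeWhile (fun c => c != '[') = pre := hpredef.symm
      rw [htwb]
      have hlb : body.length = pre.length + suf.length + 1 := by rw [hdecomp]; simp; omega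
      rw [if_neg (by omega)]
      have : body.drop (pre.length + 1) = suf := by
        rw [hdecomp, List.drop_append]; simp
      rw [this]
    simp only [h', Bool.true_eq_false, if_false]
    rw [hloop, hslice, hbslice, hpart]
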